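-- pv_equiv track=rewrite | github.com/gh0stintheshe11/LeetCode-Solutions | solutions/moving-stones-until-consecutive-ii/Python3.py | numMovesStonesII
-- ===== SOURCE A (Python) =====
-- from typing import List
--
-- def numMovesStonesII(stones: List[int]) -> List[int]:
--     stones.sort()
--     n = len(stones)
--     max_moves = max(stones[n-1] - stones[1], stones[n-2] - stones[0]) - (n - 2)
--
--     min_moves = n
--     i = 0
--     for j in range(n):
--         while stones[j] - stones[i] + 1 > n:
--             i += 1
--         if j - i + 1 == n - 1 and stones[j] - stones[i] + 1 == n - 1:
--             min_moves = min(min_moves, 2)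
--         else:
--             min_moves = min(min_moves, n - (j - i + 1))
--
--     return [min_moves, max_moves]
-- ===== SOURCE B (Python) =====
-- from typing import List
--
-- # Hand-written binary search (CPython's bisect_left algorithm); A imports no
-- # stdlib module we could reuse for this.
-- def _bisect_left(a, x):
--     lo, hi = 0, len(a)
--     while lo < hi:
--         mid = (lo + hi) // 2
--         if a[mid] < x:
--             lo = mid + 1
--         else:
--             hi = mid
--     return lo
--
-- def numMovesStonesII(stones: List[int]) -> List[int]:
--     stones.sort()
--     n = len(stones)
--
--     def cand(j):
--         # moves needed for the length-n window ending at stones[j]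
--         i = _bisect_left(stones, stones[j] - n + 1)
--         if j - i + 1 == n - 1 and stones[j] - stones[i] + 1 == n - 1:
--             return 2
--         return n - (j - i + 1)
--
--     return [min(cand(j) for j in range(n)),
--             max(stones[-1] - stones[1], stones[-2] - stones[0]) - (n - 2)]
-- ===== Notes on version B (the rewrite author's own statement) =====
-- stated objective: alternative
-- what changed: B drops A's accumulator loop with a carried two-pointer (inner while advancing i across iterations) and instead takes min() over per-endpoint candidates, each window's left edge found by an independent hand-written bisect_left binary search.
-- outside the precondition, e.g. on numMovesStonesII([]): A raises IndexError, B raises ValueError; on numMovesStonesII([5]): A raises IndexError, B raises IndexError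
import Mathlib
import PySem

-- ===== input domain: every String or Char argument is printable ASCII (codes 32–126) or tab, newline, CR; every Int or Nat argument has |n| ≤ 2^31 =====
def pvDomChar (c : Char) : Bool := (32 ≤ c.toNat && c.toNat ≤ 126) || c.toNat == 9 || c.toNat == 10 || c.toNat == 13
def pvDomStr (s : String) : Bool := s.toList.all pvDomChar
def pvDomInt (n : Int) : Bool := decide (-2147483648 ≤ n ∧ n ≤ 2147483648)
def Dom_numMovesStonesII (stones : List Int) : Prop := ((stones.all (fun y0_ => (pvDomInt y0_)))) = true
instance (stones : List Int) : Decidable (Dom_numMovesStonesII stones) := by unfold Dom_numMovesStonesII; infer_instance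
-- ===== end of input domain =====

-- B replaces A's accumulator loop with carried two-pointer (inner while) by a min over
-- per-endpoint candidates, each located by an independent bisect_left binary search;
-- objective: alternative (same O(n log n) cost). Python A sorts its argument in place
-- (B does the same); the equivalence proved here is about the RETURN value.

-- ===== PORT A =====
-- Python's inner 'while stones[j] - stones[i] + 1 > n: i += 1', made total with fuel
-- (fuel = n suffices: the loop always stops at i ≤ j, proved below in aWhile_eq).
def aWhile (s : List Int) (nI : Int) (j : Nat) : Nat → Nat → Nat
  | 0, i => i
  | fuel+1, i => if s.getD j 0 - s.getD i 0 + 1 > nI then aWhile s nI j fuel (i+1) else i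

-- one iteration of A's 'for j in range(n)' loop; state = (min_moves, i)
def aStep (s : List Int) (st : Int × Nat) (j : Nat) : Int × Nat :=
  let i := aWhile s (s.length : Int) j s.length st.2
  (if (j : Int) - (i : Int) + 1 = (s.length : Int) - 1 ∧
      s.getD j 0 - s.getD i 0 + 1 = (s.length : Int) - 1
   then min st.1 2
   else min st.1 ((s.length : Int) - ((j : Int) - (i : Int) + 1)), i)

-- indices n-1, 1, n-2, 0 are in range under Pre_ (len ≥ 2), so getD is Python-exact
def numMovesStonesII (stones : List Int) : List Int :=
  let s := PySem.List.sorted stones (fun v => v)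
  let n := s.length
  let maxMoves := max (s.getD (n-1) 0 - s.getD 1 0) (s.getD (n-2) 0 - s.getD 0 0) - ((n : Int) - 2)
  let p := (List.range n).foldl (aStep s) ((n : Int), 0)
  [p.1, maxMoves]

-- ===== PORT B =====
-- Source B's cand(j); its hand-written _bisect_left is CPython's bisect_left algorithm,
-- ported as PySem.List.bisectLeft (the same lo/hi midpoint loop)
def bCand (s : List Int) (j : Nat) : Int :=
  let i := PySem.List.bisectLeft s (s.getD j 0 - (s.length : Int) + 1)
  if (j : Int) - (i : Int) + 1 = (s.length : Int) - 1 ∧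
     s.getD j 0 - s.getD i 0 + 1 = (s.length : Int) - 1
  then 2
  else (s.length : Int) - ((j : Int) - (i : Int) + 1)

-- min(...) over a generator that is nonempty under Pre_ (n ≥ 2): total form minD;
-- stones[-1]/stones[-2] equal stones[n-1]/stones[n-2] here, written with getD (in range under Pre_)
def numMovesStonesII_alt (stones : List Int) : List Int :=
  let s := PySem.List.sorted stones (fun v => v)
  let n := s.length
  [PySem.List.minD ((List.range n).map (bCand s)) (fun v => v) 0,
   max (s.getD (n-1) 0 - s.getD 1 0) (s.getD (n-2) 0 - s.getD 0 0) - ((n : Int) - 2)]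

-- ===== PRECONDITION & SPEC =====
-- Python A raises IndexError (stones[1] / stones[n-2]) on lists of length < 2
def Pre_numMovesStonesII (stones : List Int) : Prop := 2 ≤ stones.length
instance (stones : List Int) : Decidable (Pre_numMovesStonesII stones) := by
  unfold Pre_numMovesStonesII; infer_instance

def pvWitness_numMovesStonesII : List Int := [1, 5, 3]

def Spec_numMovesStonesII (stones : List Int) (out : List Int) : Prop := out = numMovesStonesII_alt stones
instance (stones : List Int) (out : List Int) : Decidable (Spec_numMovesStonesII stones out) := by unfold Spec_numMovesStonesII; infer_instance

-- ===== CLAIM (what is proved, stated in full; the proofs are below) =====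
def Claim_equal_numMovesStonesII : Prop := ∀ (stones : List Int), Dom_numMovesStonesII stones → Pre_numMovesStonesII stones → Spec_numMovesStonesII stones (numMovesStonesII stones)

-- ===== LEMMAS AND PROOFS =====

-- in a ≤-sorted list, entries are monotone in the index
lemma getD_mono_of_pairwise {s : List Int} (hs : s.Pairwise (· ≤ ·))
    {a b : Nat} (hab : a ≤ b) (hb : b < s.length) :
    s.getD a 0 ≤ s.getD b 0 := by
  rcases Nat.lt_or_ge a b with h | h
  · rw [List.getD_eq_getElem s 0 (Nat.lt_trans h hb), List.getD_eq_getElem s 0 hb]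
    exact List.pairwise_iff_getElem.mp hs a b _ _ h
  · have : a = b := Nat.le_antisymm hab h
    subst this; rfl

-- bisectLeft is monotone in the searched value
lemma bisectLeft_mono {s : List Int} (hs : s.Pairwise (· ≤ ·)) {x y : Int} (hxy : x ≤ y) :
    PySem.List.bisectLeft s x ≤ PySem.List.bisectLeft s y := by
  by_contra h
  push Not at h
  obtain ⟨hylen, -, hyge⟩ := PySem.List.bisectLeft_spec s y hs
  obtain ⟨-, hxlt, -⟩ := PySem.List.bisectLeft_spec s x hs
  have hk : PySem.List.bisectLeft s y < s.length :=
    Nat.lt_of_lt_of_le h (PySem.List.bisectLeft_spec s x hs).1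
  have h1 := hxlt _ hk h
  have h2 := hyge _ hk (Nat.le_refl _)
  omega

-- the left edge of the window ending at index j is at most j
lemma bisect_le_j (s : List Int) (hs : s.Pairwise (· ≤ ·)) (j : Nat) (hj : j < s.length) :
    PySem.List.bisectLeft s (s.getD j 0 - (s.length : Int) + 1) ≤ j := by
  by_contra hc
  push Not at hc
  obtain ⟨-, hlt, -⟩ := PySem.List.bisectLeft_spec s (s.getD j 0 - (s.length : Int) + 1) hs
  have := hlt j hj hc
  rw [List.getD_eq_getElem s 0 hj] at this
  omega

-- each of B's candidates is at most n (when n ≥ 2)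
lemma bCand_le (s : List Int) (hs : s.Pairwise (· ≤ ·)) (hn : 2 ≤ s.length)
    (j : Nat) (hj : j < s.length) :
    bCand s j ≤ (s.length : Int) := by
  have hbj := bisect_le_j s hs j hj
  simp only [bCand]
  split_ifs
  · exact_mod_cast hn
  · have : (PySem.List.bisectLeft s (s.getD j 0 - (s.length : Int) + 1) : Int) ≤ (j : Int) :=
      Int.ofNat_le.mpr hbj
    omega

-- A's fueled while loop lands exactly on bisect_left of the window's left edge
lemma aWhile_eq (s : List Int) (hs : s.Pairwise (· ≤ ·)) (j : Nat) (hj : j < s.length)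
    (fuel i0 : Nat)
    (hb : i0 ≤ PySem.List.bisectLeft s (s.getD j 0 - (s.length : Int) + 1))
    (hf : PySem.List.bisectLeft s (s.getD j 0 - (s.length : Int) + 1) ≤ i0 + fuel) :
    aWhile s (s.length : Int) j fuel i0 =
      PySem.List.bisectLeft s (s.getD j 0 - (s.length : Int) + 1) := by
  set x := s.getD j 0 - (s.length : Int) + 1 with hx
  obtain ⟨hlen, hlt, hge⟩ := PySem.List.bisectLeft_spec s x hs
  have hbj : PySem.List.bisectLeft s x ≤ j := bisect_le_j s hs j hj
  induction fuel generalizing i0 with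
  | zero => simp [aWhile]; omega
  | succ fuel ih =>
    rcases Nat.lt_or_ge i0 (PySem.List.bisectLeft s x) with h | h
    · have hi0 : i0 < s.length := Nat.lt_of_lt_of_le h hlen
      have hcond : s.getD j 0 - s.getD i0 0 + 1 > (s.length : Int) := by
        have := hlt i0 hi0 h
        rw [List.getD_eq_getElem s 0 hi0]
        omega
      rw [aWhile, if_pos hcond]
      exact ih (i0 + 1) h (by omega)
    · have heq : i0 = PySem.List.bisectLeft s x := Nat.le_antisymm hb h
      have hi0 : i0 < s.length := by omega
      have hcond : ¬ s.getD j 0 - s.getD i0 0 + 1 > (s.length : Int) := by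
        have := hge i0 hi0 (by omega)
        rw [List.getD_eq_getElem s 0 hi0]
        omega
      rw [aWhile, if_neg hcond]
      exact heq

-- the two loops agree: A's carried pointer always re-meets B's bisect_left, and A's
-- accumulator step is 'min' with B's candidate
lemma fold_eq (s : List Int) (hs : s.Pairwise (· ≤ ·)) :
    ∀ (l : List Nat), (∀ j ∈ l, j < s.length) → l.Pairwise (· ≤ ·) →
    ∀ (m : Int) (i0 : Nat),
      (∀ j ∈ l, i0 ≤ PySem.List.bisectLeft s (s.getD j 0 - (s.length : Int) + 1)) →
      (l.foldl (aStep s) (m, i0)).1 = l.foldl (fun m j => min m (bCand s j)) m := by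
  intro l
  induction l with
  | nil => intro _ _ m i0 _; rfl
  | cons j t ih =>
    intro hmem hpw m i0 hi0
    have hj : j < s.length := hmem j (List.mem_cons_self ..)
    have hwhile :
        aWhile s (s.length : Int) j s.length i0 =
          PySem.List.bisectLeft s (s.getD j 0 - (s.length : Int) + 1) :=
      aWhile_eq s hs j hj s.length i0 (hi0 j (List.mem_cons_self ..))
        (le_trans (PySem.List.bisectLeft_spec s _ hs).1 (Nat.le_add_left _ _))
    have hstep : aStep s (m, i0) j =
        (min m (bCand s j), PySem.List.bisectLeft s (s.getD j 0 - (s.length : Int) + 1)) := by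
      simp only [aStep, bCand, hwhile]
      split_ifs <;> rfl
    rw [List.foldl_cons, List.foldl_cons, hstep]
    apply ih (fun j' hj' => hmem j' (List.mem_cons_of_mem _ hj'))
      (List.Pairwise.sublist (List.sublist_cons_self j t) hpw)
    intro j' hj'
    apply bisectLeft_mono hs
    have hle : j ≤ j' := (List.pairwise_cons.mp hpw).1 j' hj'
    have := getD_mono_of_pairwise hs hle (hmem j' (List.mem_cons_of_mem _ hj'))
    omega

-- folding min never rises above its start
lemma foldl_min_le_init (t : List Int) : ∀ (x : Int), t.foldl min x ≤ x := by
  induction t with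
  | nil => intro x; exact le_of_eq rfl
  | cons a t ih => intro x; exact (ih (min x a)).trans (min_le_left x a)

-- ===== VERDICT (by name: the statement is the Claim_ definition above) =====
theorem numMovesStonesII_spec : Claim_equal_numMovesStonesII := by
  intro stones _ hpre
  simp only [Spec_numMovesStonesII, numMovesStonesII, numMovesStonesII_alt]
  have hs : (PySem.List.sorted stones (fun v => v)).Pairwise (· ≤ ·) :=
    PySem.List.sorted_pairwise stones (fun v => v)
  set s := PySem.List.sorted stones (fun v => v) with hsdef
  have hn : 2 ≤ s.length := by
    rw [hsdef, PySem.List.length_sorted stones (fun v => v) false]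
    exact hpre
  -- A's fold = foldl min over B's candidates, seeded with n
  have h1 : ((List.range s.length).foldl (aStep s) ((s.length : Int), 0)).1
      = (List.range s.length).foldl (fun m j => min m (bCand s j)) (s.length : Int) :=
    fold_eq s hs (List.range s.length) (fun j hj => List.mem_range.mp hj)
      (List.pairwise_lt_range.imp Nat.le_of_lt) ((s.length : Int)) 0 (fun j _ => Nat.zero_le _)
  -- peel the first candidate off range n (n ≥ 2 > 0)
  obtain ⟨k, hk⟩ : ∃ k, s.length = k + 1 := ⟨s.length - 1, by omega⟩
  have hrange : List.range s.length = 0 :: (List.range k).map Nat.succ := by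
    rw [hk, List.range_succ_eq_map]
  have h2 : (List.range s.length).foldl (fun m j => min m (bCand s j)) (s.length : Int)
      = PySem.List.minD ((List.range s.length).map (bCand s)) (fun v => v) 0 := by
    rw [hrange]
    simp only [List.map_cons, List.foldl_cons, PySem.List.minD_id_cons, ← List.foldl_map]
    rw [List.foldl_assoc]
    exact min_eq_right ((foldl_min_le_init _ (bCand s 0)).trans (bCand_le s hs hn 0 (by omega)))
  rw [h1, h2]
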